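-- pv_equiv track=rewrite | github.com/stoverp/advent-of-code | 2024/day9/part2.py | has_room
-- ===== SOURCE A (Python) =====
-- def has_room(empty_indices, file_indices):
--   contiguous = 1
--   last_v = None
--   length = len(file_indices)
--   for index, v in enumerate(empty_indices):
--     if v > file_indices[0]:
--       return None
--     if last_v is None or v - last_v > 1:
--       contiguous = 1
--     else:
--       contiguous += 1
--     if contiguous == length:
--       return index - (length - 1)
--     last_v = v
--   return None
-- ===== SOURCE B (Python) =====
-- def has_room(empty_indices, file_indices):
--     if not empty_indices:
--         return None
--     limit = file_indices[0]
--     # phase 1: prefix of indices not exceeding the file's first index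
--     prefix = []
--     for v in empty_indices:
--         if v > limit:
--             break
--         prefix.append(v)
--     # phase 2: walk maximal contiguous runs (break only on a gap > 1)
--     need = len(file_indices)
--     pos = 0
--     rest = prefix
--     while rest:
--         i = 1
--         while i < len(rest) and rest[i] - rest[i - 1] <= 1:
--             i += 1
--         if i >= need:
--             return pos
--         pos += i
--         rest = rest[i:]
--     return None
-- ===== Notes on version B (the rewrite author's own statement) =====
-- stated objective: alternative
-- what changed: Replaces the single pass threading a 'contiguous' counter and 'last_v' through every element by a two-phase plan: first cut the list to the prefix not exceeding file_indices[0], then walk that prefix run by run (a run ends only at a gap > 1), returning the start position of the first run at least len(file_indices) long.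
import Mathlib
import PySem

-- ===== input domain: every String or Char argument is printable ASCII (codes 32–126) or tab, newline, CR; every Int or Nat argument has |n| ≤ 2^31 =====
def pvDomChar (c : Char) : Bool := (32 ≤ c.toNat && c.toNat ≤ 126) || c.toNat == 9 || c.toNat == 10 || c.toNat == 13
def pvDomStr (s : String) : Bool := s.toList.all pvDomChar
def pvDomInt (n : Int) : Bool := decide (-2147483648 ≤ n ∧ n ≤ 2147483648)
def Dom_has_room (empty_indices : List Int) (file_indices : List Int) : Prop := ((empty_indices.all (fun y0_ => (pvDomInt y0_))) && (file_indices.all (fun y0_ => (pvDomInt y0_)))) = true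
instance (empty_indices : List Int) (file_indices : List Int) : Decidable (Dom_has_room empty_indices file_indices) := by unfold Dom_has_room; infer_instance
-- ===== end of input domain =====

-- B walks the ≤ file_indices[0] prefix run by run instead of A's one pass with a contiguous counter; same values, no speed claim.

-- ===== PORT A =====
-- the for-loop of A: state (index, contiguous, last_v); file_indices[0] is read inside the loop (none = IndexError)
def hasRoomLoop (file_indices : List Int) (length : Int) :
    List Int → Int → Int → Option Int → Option Int
  | [], _, _, _ => none
  | v :: rest, index, contiguous, last_v =>
    match PySem.List.pyGet? file_indices 0 with
    | none => none  -- Python raises IndexError here; excluded by Pre_has_room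
    | some f0 =>
      if v > f0 then none
      else
        let c : Int := match last_v with
          | none => 1
          | some lv => if v - lv > 1 then 1 else contiguous + 1
        if c = length then some (index - (length - 1))
        else hasRoomLoop file_indices length rest (index + 1) c (some v)

def has_room (empty_indices : List Int) (file_indices : List Int) : Option Int :=
  hasRoomLoop file_indices (file_indices.length : Int) empty_indices 0 1 none

-- ===== PORT B =====
-- prefix of values not exceeding the limit (Source B's first for-loop with break)
def prefixLe (limit : Int) : List Int → List Int
  | [] => []
  | v :: rest => if v > limit then [] else v :: prefixLe limit rest

-- Source B's inner while: how many further elements extend the run after `prev`, and the remainder (rest[i:])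
def runSplit (prev : Int) : List Int → Nat × List Int
  | [] => (0, [])
  | v :: rest =>
    if v - prev ≤ 1 then
      let p := runSplit v rest
      (p.1 + 1, p.2)
    else (0, v :: rest)

theorem runSplit_len (prev : Int) (l : List Int) : (runSplit prev l).2.length ≤ l.length := by
  induction l generalizing prev with
  | nil => simp [runSplit]
  | cons v rest ih =>
    simp only [runSplit]
    split
    · exact Nat.le_succ_of_le (ih v)
    · exact Nat.le_refl _

-- Source B's outer while over runs
def altLoop (need : Int) : List Int → Int → Option Int
  | [], _ => none
  | v :: tl, pos =>
    let p := runSplit v tl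
    let i : Int := (p.1 : Int) + 1
    if need ≤ i then some pos
    else altLoop need p.2 (pos + i)
termination_by l _ => l.length
decreasing_by
  simpa using Nat.lt_succ_of_le (runSplit_len v tl)

def has_room_alt (empty_indices : List Int) (file_indices : List Int) : Option Int :=
  match empty_indices with
  | [] => none
  | _ :: _ =>
    match PySem.List.pyGet? file_indices 0 with
    | none => none  -- Python raises IndexError here; excluded by Pre_has_room
    | some limit => altLoop (file_indices.length : Int) (prefixLe limit empty_indices) 0

-- ===== PRECONDITION & SPEC =====
-- A (and B) raise IndexError reading file_indices[0] exactly when empty_indices is non-empty and file_indices is empty.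
def Pre_has_room (empty_indices : List Int) (file_indices : List Int) : Prop :=
  empty_indices = [] ∨ file_indices ≠ []
instance (empty_indices : List Int) (file_indices : List Int) : Decidable (Pre_has_room empty_indices file_indices) := by unfold Pre_has_room; infer_instance

def pvWitness_has_room : List Int × List Int := ([0, 1, 2, 5, 6], [4, 9])

def Spec_has_room (empty_indices : List Int) (file_indices : List Int) (out : Option Int) : Prop := out = has_room_alt empty_indices file_indices
instance (empty_indices : List Int) (file_indices : List Int) (out : Option Int) : Decidable (Spec_has_room empty_indices file_indices out) := by unfold Spec_has_room; infer_instance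

-- ===== CLAIM (what is proved, stated in full; the proofs are below) =====
def Claim_equal_has_room : Prop := ∀ (empty_indices : List Int) (file_indices : List Int), Dom_has_room empty_indices file_indices → Pre_has_room empty_indices file_indices → Spec_has_room empty_indices file_indices (has_room empty_indices file_indices)

-- ===== LEMMAS AND PROOFS =====

-- A's loop with the "v > f0 → None" cut removed (proof-side model of A on the cut prefix)
def loopANC (need : Int) : List Int → Int → Int → Option Int → Option Int
  | [], _, _, _ => none
  | v :: rest, index, contiguous, last_v =>
    let c : Int := match last_v with
      | none => 1
      | some lv => if v - lv > 1 then 1 else contiguous + 1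
    if c = need then some (index - (need - 1))
    else loopANC need rest (index + 1) c (some v)

-- cutting: A's guarded loop equals the unguarded loop on the ≤ f0 prefix
theorem loopA_cut (fs : List Int) (f0 : Int) (need : Int) (l : List Int) :
    ∀ idx c last, hasRoomLoop (f0 :: fs) need l idx c last
      = loopANC need (prefixLe f0 l) idx c last := by
  induction l with
  | nil => intro idx c last; simp [hasRoomLoop, prefixLe, loopANC]
  | cons v rest ih =>
    intro idx c last
    by_cases hv : v > f0
    · cases last <;>
        simp [hasRoomLoop, prefixLe, hv, PySem.List.pyGet?, PySem.List.pyIdx?, loopANC]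
    · cases last with
      | none =>
        simp only [hasRoomLoop, loopANC, prefixLe, PySem.List.pyGet?, PySem.List.pyIdx?,
          if_neg hv]
        norm_num [hv]
        split
        · rfl
        · exact ih _ _ _
      | some lv =>

        simp only [hasRoomLoop, loopANC, prefixLe, PySem.List.pyGet?, PySem.List.pyIdx?,
          if_neg hv]
        norm_num [hv]
        split <;> split
        · rfl
        · exact ih _ _ _
        · rfl
        · exact ih _ _ _

-- after a gap (> 1) the loop behaves as freshly started, whatever contiguous/last were
theorem loopANC_fresh (need : Int) (w lv : Int) (ws : List Int) (idx c c' : Int)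
    (h : w - lv > 1) :
    loopANC need (w :: ws) idx c (some lv) = loopANC need (w :: ws) idx c' none := by
  simp [loopANC, h]

-- core run lemma: inside a run started with count c, the loop returns the run start (idx - c)
-- iff the run reaches length need, else proceeds freshly on the remainder
theorem loopANC_run (need : Int) (hneed : 2 ≤ need) :
    ∀ (tl : List Int) (prev idx c : Int), 1 ≤ c → c < need →
      loopANC need tl idx c (some prev)
        = (if need ≤ c + ((runSplit prev tl).1 : Int) then some (idx - c)
           else loopANC need (runSplit prev tl).2 (idx + ((runSplit prev tl).1 : Int)) 1 none) := by
  intro tl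
  induction tl with
  | nil =>
    intro prev idx c h1 h2
    simp only [runSplit, loopANC]
    rw [if_neg (by push_cast; omega)]
  | cons v rest ih =>
    intro prev idx c h1 h2
    by_cases hg : v - prev > 1
    · -- gap: run ends before v
      have hsp : runSplit prev (v :: rest) = (0, v :: rest) := by
        simp [runSplit]; omega
      rw [hsp]
      rw [if_neg (by push_cast; omega)]
      simpa using loopANC_fresh need v prev rest idx c 1 hg
    · -- v extends the run
      have hle : v - prev ≤ 1 := by omega
      have hsp : runSplit prev (v :: rest) = ((runSplit v rest).1 + 1, (runSplit v rest).2) := by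
        simp [runSplit, hle]
      rw [hsp]
      by_cases hc : c + 1 = need
      · -- the run reaches need at v
        have : loopANC need (v :: rest) idx c (some prev) = some (idx - (need - 1)) := by
          simp [loopANC, hg, hc]
        rw [this, if_pos (by push_cast; omega)]
        congr 1; omega
      · have hstep : loopANC need (v :: rest) idx c (some prev)
            = loopANC need rest (idx + 1) (c + 1) (some v) := by
          simp [loopANC, hg, hc]
        rw [hstep, ih v (idx + 1) (c + 1) (by omega) (by omega)]
        have hcond : (need ≤ c + 1 + ((runSplit v rest).1 : Int))
            ↔ (need ≤ c + (((runSplit v rest).1 + 1 : Nat) : Int)) := by push_cast; omega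
        by_cases hb : need ≤ c + 1 + ((runSplit v rest).1 : Int)
        · rw [if_pos hb, if_pos (hcond.mp hb), ]
          congr 1; omega
        · rw [if_neg hb, if_neg (fun h => hb (hcond.mpr h))]
          congr 1; push_cast; omega

-- main: the counter loop started fresh equals B's run-by-run walk, for need ≥ 1
theorem loopANC_eq_altLoop (need : Int) (_hneed : 1 ≤ need) :
    ∀ (n : Nat) (l : List Int), l.length = n → ∀ (idx c : Int),
      loopANC need l idx c none = altLoop need l idx := by
  intro n
  induction n using Nat.strong_induction_on with
  | _ n ih =>
    intro l hn idx c
    match l with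
    | [] => simp [loopANC, altLoop]
    | v :: tl =>
      by_cases h1 : need = 1
      · subst h1
        have hpos : (1 : Int) ≤ ((runSplit v tl).1 : Int) + 1 := by omega
        simp [loopANC, altLoop, hpos]
      · have hneed2 : 2 ≤ need := by omega
        have hstep : loopANC need (v :: tl) idx c none
            = loopANC need tl (idx + 1) 1 (some v) := by
          simp [loopANC, show ¬ (1 : Int) = need by omega]
        rw [hstep, loopANC_run need hneed2 tl v (idx + 1) 1 (by omega) (by omega)]
        simp only [altLoop]
        by_cases hb : need ≤ ((runSplit v tl).1 : Int) + 1
        · rw [if_pos (by omega : need ≤ 1 + ((runSplit v tl).1 : Int)), if_pos hb]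
          congr 1; omega
        · rw [if_neg (by omega : ¬ need ≤ 1 + ((runSplit v tl).1 : Int)), if_neg hb]
          have hlen : (runSplit v tl).2.length < n := by
            have := runSplit_len v tl
            simp at hn; omega
          rw [ih _ hlen (runSplit v tl).2 rfl (idx + 1 + ((runSplit v tl).1 : Int)) 1]
          congr 1; omega

-- ===== VERDICT (by name: the statement is the Claim_ definition above) =====
theorem has_room_spec : Claim_equal_has_room := by
  intro emp file _hdom hpre
  unfold Spec_has_room has_room has_room_alt
  match emp, hpre with
  | [], _ => simp [hasRoomLoop]
  | e :: es, hpre =>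
    have hf : file ≠ [] := by
      rcases hpre with h | h
      · exact absurd h (by simp)
      · exact h
    match file, hf with
    | f :: fs, _ =>
      have hget : PySem.List.pyGet? (f :: fs) 0 = some f := by
        simp [PySem.List.pyGet?, PySem.List.pyIdx?]
      rw [hget]
      rw [loopA_cut fs f ((f :: fs).length : Int) (e :: es) 0 1 none]
      exact loopANC_eq_altLoop _ (by simp) _ _ rfl 0 1
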